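-- pv_equiv track=rewrite | github.com/Manoe-K/create_queries | create_queries.py | triple_patterns_to_query
-- ===== SOURCE A (Python) =====
-- def triple_pattern_to_sparql(pattern):
--     if pattern['predicate'] == 'a':
--         return pattern['subject'] + ' ' + pattern['predicate'] + ' <' + pattern['object'] + '>' + '.'
--     elif pattern['predicate'] == 'rdf:type':
--         return pattern['subject'] + ' ' + pattern['predicate'] + ' <' + pattern['object'] + '>' + '.'
--     else:
--         return pattern['subject'] + ' <' + pattern['predicate'] + '> ' + pattern['object'] + '.'
--
-- def triple_patterns_to_query(patterns, name1, name2):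
--
--     query = 'SELECT COUNT(*) WHERE {\n'
--     query += '    GRAPH <http://localhost:8890/' + name1 + '> {\n'
--     for pattern in patterns:
--         if pattern['source'] == "M1":
--             query += '        ' + triple_pattern_to_sparql(pattern) + '\n'
--     query += '    }.\n'
--     query += '    GRAPH <http://localhost:8890/' + name2 + '> {\n'
--     for pattern in patterns:
--         if pattern['source'] == "M2":
--             query += '        ' + triple_pattern_to_sparql(pattern) + '\n'
--     query += '    }\n'
--     query += '}'
--
--     return query
-- ===== SOURCE B (Python) =====
-- def _sparql_line(pattern):
--     s, p, o = pattern['subject'], pattern['predicate'], pattern['object']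
--     if p in ('a', 'rdf:type'):
--         return s + ' ' + p + ' <' + o + '>.'
--     return s + ' <' + p + '> ' + o + '.'
--
-- def triple_patterns_to_query(patterns, name1, name2):
--     m1_lines, m2_lines = [], []
--     for pattern in patterns:
--         src = pattern['source']
--         if src == 'M1':
--             m1_lines.append(_sparql_line(pattern))
--         elif src == 'M2':
--             m2_lines.append(_sparql_line(pattern))
--     return (
--         'SELECT COUNT(*) WHERE {\n'
--         + '    GRAPH <http://localhost:8890/' + name1 + '> {\n'
--         + ''.join('        ' + l + '\n' for l in m1_lines)
--         + '    }.\n'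
--         + '    GRAPH <http://localhost:8890/' + name2 + '> {\n'
--         + ''.join('        ' + l + '\n' for l in m2_lines)
--         + '    }\n'
--         + '}'
--     )
-- ===== Notes on version B (the rewrite author's own statement) =====
-- stated objective: alternative
-- what changed: B replaces A's two filtered scans that each grow one query string with a single pass that partitions formatted lines into two lists, then assembles the query from fixed template fragments around the two joined lists; the line-formatting helper is collapsed into a membership test.
import Mathlib
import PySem

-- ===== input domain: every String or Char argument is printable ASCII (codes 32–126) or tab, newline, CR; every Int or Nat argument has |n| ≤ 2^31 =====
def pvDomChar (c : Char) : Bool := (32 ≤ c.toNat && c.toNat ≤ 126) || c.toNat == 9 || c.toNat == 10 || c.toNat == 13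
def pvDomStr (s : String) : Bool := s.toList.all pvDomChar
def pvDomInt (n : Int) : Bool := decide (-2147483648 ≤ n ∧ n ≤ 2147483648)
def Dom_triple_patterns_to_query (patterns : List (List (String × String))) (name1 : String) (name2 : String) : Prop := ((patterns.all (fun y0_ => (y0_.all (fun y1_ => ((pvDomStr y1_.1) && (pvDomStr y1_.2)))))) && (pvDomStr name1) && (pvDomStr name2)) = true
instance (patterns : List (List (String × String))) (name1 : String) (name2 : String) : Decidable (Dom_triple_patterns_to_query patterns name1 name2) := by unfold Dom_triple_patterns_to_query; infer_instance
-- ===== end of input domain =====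

-- B is 'simpler': one pass over `patterns` partitions the formatted lines into two lists
-- (instead of A's two filtered scans that grow one string), and the query is assembled
-- from the fixed template fragments around the two joined line lists.

-- pattern[k] : KeyError when k is absent → Pre_ excludes that; here the lookup with "" default
def pvLookup (p : List (String × String)) (k : String) : String :=
  ((PySem.Dict.mk p).get? k).getD ""

-- ===== PORT A =====
def triple_pattern_to_sparql (p : List (String × String)) : String :=
  if pvLookup p "predicate" = "a" then
    pvLookup p "subject" ++ " " ++ pvLookup p "predicate" ++ " <" ++ pvLookup p "object" ++ ">" ++ "."
  else if pvLookup p "predicate" = "rdf:type" then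
    pvLookup p "subject" ++ " " ++ pvLookup p "predicate" ++ " <" ++ pvLookup p "object" ++ ">" ++ "."
  else
    pvLookup p "subject" ++ " <" ++ pvLookup p "predicate" ++ "> " ++ pvLookup p "object" ++ "."

def triple_patterns_to_query (patterns : List (List (String × String))) (name1 : String) (name2 : String) : String :=
  let query := "SELECT COUNT(*) WHERE {\n"
  let query := query ++ ("    GRAPH <http://localhost:8890/" ++ name1 ++ "> {\n")
  let query := patterns.foldl (fun q p =>
      if pvLookup p "source" = "M1" then q ++ ("        " ++ triple_pattern_to_sparql p ++ "\n") else q) query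
  let query := query ++ "    }.\n"
  let query := query ++ ("    GRAPH <http://localhost:8890/" ++ name2 ++ "> {\n")
  let query := patterns.foldl (fun q p =>
      if pvLookup p "source" = "M2" then q ++ ("        " ++ triple_pattern_to_sparql p ++ "\n") else q) query
  let query := query ++ "    }\n"
  query ++ "}"

-- ===== PORT B =====
def sparql_line (p : List (String × String)) : String :=
  let s := pvLookup p "subject"
  let pr := pvLookup p "predicate"
  let o := pvLookup p "object"
  if pr = "a" ∨ pr = "rdf:type" then s ++ " " ++ pr ++ " <" ++ o ++ ">."
  else s ++ " <" ++ pr ++ "> " ++ o ++ "."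

def triple_patterns_to_query_alt (patterns : List (List (String × String))) (name1 : String) (name2 : String) : String :=
  let lines := patterns.foldl (fun (acc : List String × List String) p =>
      let src := pvLookup p "source"
      if src = "M1" then (acc.1 ++ [sparql_line p], acc.2)
      else if src = "M2" then (acc.1, acc.2 ++ [sparql_line p])
      else acc) ([], [])
  "SELECT COUNT(*) WHERE {\n"
    ++ ("    GRAPH <http://localhost:8890/" ++ name1 ++ "> {\n")
    ++ String.join (lines.1.map (fun l => "        " ++ l ++ "\n"))
    ++ "    }.\n"
    ++ ("    GRAPH <http://localhost:8890/" ++ name2 ++ "> {\n")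
    ++ String.join (lines.2.map (fun l => "        " ++ l ++ "\n"))
    ++ "    }\n"
    ++ "}"

-- ===== PRECONDITION & SPEC =====
-- Pre_: every pattern has a 'source' key, and those routed to a graph block (source M1/M2)
-- also have the 'subject'/'predicate'/'object' keys — exactly where Python A avoids KeyError.
def Pre_triple_patterns_to_query (patterns : List (List (String × String))) (_name1 : String) (_name2 : String) : Prop :=
  ∀ p ∈ patterns, ((PySem.Dict.mk p).get? "source").isSome ∧
    (pvLookup p "source" = "M1" ∨ pvLookup p "source" = "M2" →
      ((PySem.Dict.mk p).get? "subject").isSome ∧ ((PySem.Dict.mk p).get? "predicate").isSome ∧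
      ((PySem.Dict.mk p).get? "object").isSome)
instance (patterns : List (List (String × String))) (name1 : String) (name2 : String) : Decidable (Pre_triple_patterns_to_query patterns name1 name2) := by unfold Pre_triple_patterns_to_query; infer_instance

def pvWitness_triple_patterns_to_query : (List (List (String × String))) × String × String :=
  ([[("source", "M1"), ("subject", "?s"), ("predicate", "a"), ("object", "T")],
    [("source", "M2"), ("subject", "?s"), ("predicate", "p:q"), ("object", "?o")]], "g1", "g2")

def Spec_triple_patterns_to_query (patterns : List (List (String × String))) (name1 : String) (name2 : String) (out : String) : Prop := out = triple_patterns_to_query_alt patterns name1 name2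
instance (patterns : List (List (String × String))) (name1 : String) (name2 : String) (out : String) : Decidable (Spec_triple_patterns_to_query patterns name1 name2 out) := by unfold Spec_triple_patterns_to_query; infer_instance

-- ===== CLAIM (what is proved, stated in full; the proofs are below) =====
def Claim_equal_triple_patterns_to_query : Prop := ∀ (patterns : List (List (String × String))) (name1 : String) (name2 : String), Dom_triple_patterns_to_query patterns name1 name2 → Pre_triple_patterns_to_query patterns name1 name2 → Spec_triple_patterns_to_query patterns name1 name2 (triple_patterns_to_query patterns name1 name2)

-- ===== LEMMAS AND PROOFS =====

-- A's helper and B's helper format a pattern identically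
theorem sparql_line_eq (p : List (String × String)) : sparql_line p = triple_pattern_to_sparql p := by
  unfold sparql_line triple_pattern_to_sparql
  by_cases h1 : pvLookup p "predicate" = "a" <;>
    by_cases h2 : pvLookup p "predicate" = "rdf:type" <;>
      simp [h1, h2, String.append_assoc]

theorem join_cons (x : String) (xs : List String) : String.join (x :: xs) = x ++ String.join xs := by
  have shift : ∀ (ys : List String) (a : String), ys.foldl (· ++ ·) a = a ++ ys.foldl (· ++ ·) "" := by
    intro ys
    induction ys with
    | nil => intro a; simp
    | cons y ys ih => intro a; simp only [List.foldl_cons]; rw [ih (a ++ y), ih ("" ++ y)]; simp [String.append_assoc]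
  simp only [String.join, List.foldl_cons]
  rw [shift xs ("" ++ x)]; simp

-- A's filtered string-accumulating loop equals the join of the filtered mapped lines
theorem foldl_filter_join (s : String)
    (patterns : List (List (String × String))) (q : String) :
    patterns.foldl (fun q p => if pvLookup p "source" = s then q ++ ("        " ++ triple_pattern_to_sparql p ++ "\n") else q) q
      = q ++ String.join ((patterns.filter (fun p => decide (pvLookup p "source" = s))).map
          (fun p => "        " ++ triple_pattern_to_sparql p ++ "\n")) := by
  induction patterns generalizing q with
  | nil => simp [String.join]
  | cons hd tl ih =>
    simp only [List.foldl_cons, List.filter_cons]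
    by_cases h : pvLookup hd "source" = s
    · rw [if_pos h, ih]; simp [h, join_cons, String.append_assoc]
    · rw [if_neg h, ih]; simp [h]

-- B's partitioning loop computes the two filtered line lists
theorem foldl_partition (patterns : List (List (String × String))) (a b : List String) :
    patterns.foldl (fun (acc : List String × List String) p =>
      let src := pvLookup p "source"
      if src = "M1" then (acc.1 ++ [sparql_line p], acc.2)
      else if src = "M2" then (acc.1, acc.2 ++ [sparql_line p])
      else acc) (a, b)
    = (a ++ (patterns.filter (fun p => decide (pvLookup p "source" = "M1"))).map sparql_line,
       b ++ (patterns.filter (fun p => decide (pvLookup p "source" = "M2"))).map sparql_line) := by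
  induction patterns generalizing a b with
  | nil => simp
  | cons hd tl ih =>
    by_cases h1 : pvLookup hd "source" = "M1"
    · simp [h1, ih]
    · by_cases h2 : pvLookup hd "source" = "M2" <;> simp [h1, h2, ih]

-- ===== VERDICT (by name: the statement is the Claim_ definition above) =====
theorem triple_patterns_to_query_spec : Claim_equal_triple_patterns_to_query := by
  intro patterns name1 name2 _ _
  unfold Spec_triple_patterns_to_query triple_patterns_to_query triple_patterns_to_query_alt
  simp only [foldl_partition, foldl_filter_join, List.nil_append]
  simp [String.append_assoc]
  simp only [Function.comp_def, sparql_line_eq]
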